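-- pv_equiv track=rewrite | github.com/BuilderBenv1/brain-v | scripts/schechter_meets_brainv.py | t_spiral
-- ===== SOURCE A (Python) =====
-- def t_spiral(seq):
--     # read outside-in: first, last, second, second-to-last, ...
--     out = []
--     i, j = 0, len(seq) - 1
--     while i <= j:
--         out.append(seq[i]); i += 1
--         if i <= j:
--             out.append(seq[j]); j -= 1
--     return out
-- ===== SOURCE B (Python) =====
-- def t_spiral(seq):
--     # pair each element with its mirror, flatten, then keep the first len(seq)
--     return [x for pair in zip(seq, reversed(seq)) for x in pair][:len(seq)]
-- ===== Notes on version B (the rewrite author's own statement) =====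
-- stated objective: simpler
-- what changed: Replaces the two-pointer while-loop with explicit index bookkeeping by a single comprehension: zip the sequence with its reverse, flatten the pairs, and slice to the original length.
import Mathlib
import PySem

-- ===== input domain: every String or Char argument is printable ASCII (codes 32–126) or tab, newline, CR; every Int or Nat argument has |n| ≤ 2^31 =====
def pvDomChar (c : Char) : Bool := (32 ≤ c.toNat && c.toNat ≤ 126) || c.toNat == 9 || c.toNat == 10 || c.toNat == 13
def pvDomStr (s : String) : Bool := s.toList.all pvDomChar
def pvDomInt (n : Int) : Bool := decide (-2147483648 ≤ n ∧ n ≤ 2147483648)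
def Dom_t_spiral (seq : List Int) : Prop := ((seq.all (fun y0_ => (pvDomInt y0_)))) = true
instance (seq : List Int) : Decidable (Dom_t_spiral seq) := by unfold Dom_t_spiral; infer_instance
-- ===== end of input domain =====

-- B replaces A's two-pointer while-loop by "zip with the reverse, flatten the pairs, take len(seq)" (simpler decomposition).


-- ===== PORT A =====
-- A's while loop, state (i, j, out); seq[i]/seq[j] via pyGet? (always in range when 0 ≤ i ≤ j < len, so .getD 0 is never taken on a none)
def t_spiral_loop (seq : List Int) (i j : Int) (out : List Int) : List Int :=
  if _h : i ≤ j then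
    let out1 := out ++ [(PySem.List.pyGet? seq i).getD 0]
    if _h2 : i + 1 ≤ j then
      t_spiral_loop seq (i + 1) (j - 1) (out1 ++ [(PySem.List.pyGet? seq j).getD 0])
    else out1
  else out
termination_by (j - i).toNat
decreasing_by omega

def t_spiral (seq : List Int) : List Int :=
  t_spiral_loop seq 0 ((seq.length : Int) - 1) []

-- ===== PORT B =====
-- Source B: [x for pair in zip(seq, reversed(seq)) for x in pair][:len(seq)]
def t_spiral_alt (seq : List Int) : List Int :=
  ((seq.zip seq.reverse).flatMap (fun p => [p.1, p.2])).take seq.length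

-- ===== PRECONDITION & SPEC =====
def Spec_t_spiral (seq : List Int) (out : List Int) : Prop := out = t_spiral_alt seq
instance (seq : List Int) (out : List Int) : Decidable (Spec_t_spiral seq out) := by unfold Spec_t_spiral; infer_instance

-- ===== CLAIM (what is proved, stated in full; the proofs are below) =====
def Claim_equal_t_spiral : Prop := ∀ (seq : List Int), Dom_t_spiral seq → Spec_t_spiral seq (t_spiral seq)

-- ===== LEMMAS AND PROOFS =====

-- the common reference function: outside-in spiral read (first, last, second, second-to-last, …)
def spiralRef : List Int → List Int
  | [] => []
  | a :: rest =>
    if h : rest = [] then [a]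
    else a :: rest.getLast h :: spiralRef rest.dropLast
termination_by l => l.length
decreasing_by simp [List.length_dropLast]

lemma spiralRef_nil : spiralRef [] = [] := by rw [spiralRef]

lemma spiralRef_single (a : Int) : spiralRef [a] = [a] := by rw [spiralRef]; simp

lemma spiralRef_cons_concat (a b : Int) (m : List Int) :
    spiralRef (a :: (m ++ [b])) = a :: b :: spiralRef m := by
  rw [spiralRef.eq_def]
  simp

-- the inclusive segment seq[i..j], Nat indices
def subSeg (seq : List Int) (i j : Nat) : List Int := (seq.drop i).take (j + 1 - i)

lemma subSeg_empty (seq : List Int) (i j : Nat) (h : j < i) : subSeg seq i j = [] := by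
  unfold subSeg
  rw [show j + 1 - i = 0 by omega, List.take_zero]

lemma subSeg_single (seq : List Int) (i : Nat) (hi : i < seq.length) :
    subSeg seq i i = [seq[i]] := by
  unfold subSeg
  rw [show i + 1 - i = 1 by omega, List.take_one, List.head?_drop]
  simp [List.getElem?_eq_getElem hi]

lemma subSeg_cons_concat (seq : List Int) (i j : Nat) (hij : i < j) (hj : j < seq.length) :
    subSeg seq i j = seq[i] :: (subSeg seq (i + 1) (j - 1) ++ [seq[j]]) := by
  have hi : i < seq.length := by omega
  have h1 : subSeg seq i j = seq[i] :: subSeg seq (i + 1) j := by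
    unfold subSeg
    rw [List.drop_eq_getElem_cons hi, show j + 1 - i = (j + 1 - (i + 1)) + 1 by omega,
      List.take_succ_cons]
  have h2 : subSeg seq (i + 1) j = subSeg seq (i + 1) (j - 1) ++ [seq[j]] := by
    unfold subSeg
    rw [show j + 1 - (i + 1) = (j - (i + 1)) + 1 by omega, List.take_add_one,
      show (j - 1) + 1 - (i + 1) = j - (i + 1) by omega]
    congr 1
    rw [List.getElem?_drop, show i + 1 + (j - (i + 1)) = j by omega]
    simp [List.getElem?_eq_getElem hj]
  rw [h1, h2]

lemma pyGet_in_range (seq : List Int) (i : Int) (h0 : 0 ≤ i) (_hl : i < (seq.length : Int)) :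
    (PySem.List.pyGet? seq i).getD 0 = seq[i.toNat]?.getD 0 := by
  have := PySem.List.pyGet?_natCast seq i.toNat
  rw [show ((i.toNat : Int)) = i by omega] at this
  rw [this]

-- A's loop appends the spiral read of the remaining segment seq[i..j] to out
lemma loop_eq_spiralRef (seq : List Int) :
    ∀ (n : Nat) (i j : Int) (out : List Int), 0 ≤ i → 0 ≤ j → j < (seq.length : Int) →
      (j - i).toNat ≤ n →
      t_spiral_loop seq i j out = out ++ spiralRef (subSeg seq i.toNat j.toNat) := by
  intro n
  induction n with
  | zero =>
    intro i j out h0i h0j hj hn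
    rw [t_spiral_loop]
    by_cases hij : i ≤ j
    · have hieq : i = j := by omega
      subst hieq
      have hlt : ¬ (i + 1 ≤ i) := by omega
      simp only [hij, dif_pos, dif_neg hlt]
      rw [pyGet_in_range seq i h0i hj, subSeg_single seq i.toNat (by omega), spiralRef_single]
      simp [List.getElem?_eq_getElem (show i.toNat < seq.length by omega)]
    · rw [dif_neg hij, subSeg_empty seq i.toNat j.toNat (by omega), spiralRef_nil,
        List.append_nil]
  | succ n ih =>
    intro i j out h0i h0j hj hn
    rw [t_spiral_loop]
    by_cases hij : i ≤ j
    · simp only [hij, dif_pos]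
      by_cases h2 : i + 1 ≤ j
      · rw [dif_pos h2, ih (i + 1) (j - 1) _ (by omega) (by omega) (by omega) (by omega),
          pyGet_in_range seq i h0i (by omega), pyGet_in_range seq j h0j hj,
          subSeg_cons_concat seq i.toNat j.toNat (by omega) (by omega),
          spiralRef_cons_concat,
          show (i + 1).toNat = i.toNat + 1 by omega, show (j - 1).toNat = j.toNat - 1 by omega]
        simp [List.getElem?_eq_getElem (show i.toNat < seq.length by omega),
          List.getElem?_eq_getElem (show j.toNat < seq.length by omega)]
      · rw [dif_neg h2]
        have hieq : i = j := by omega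
        subst hieq
        rw [pyGet_in_range seq i h0i hj, subSeg_single seq i.toNat (by omega), spiralRef_single]
        simp [List.getElem?_eq_getElem (show i.toNat < seq.length by omega)]
    · rw [dif_neg hij, subSeg_empty seq i.toNat j.toNat (by omega), spiralRef_nil,
        List.append_nil]

lemma t_spiral_eq_spiralRef (seq : List Int) : t_spiral seq = spiralRef seq := by
  unfold t_spiral
  cases seq with
  | nil => rw [t_spiral_loop]; simp [spiralRef_nil]
  | cons a rest =>
    rw [loop_eq_spiralRef (a :: rest) (rest.length + 1) 0 ((a :: rest).length - 1) []
        (by omega) (by simp only [List.length_cons]; omega)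
        (by simp only [List.length_cons]; omega) (by simp only [List.length_cons]; omega)]
    rw [List.nil_append]
    congr 1
    unfold subSeg
    rw [show ((((a :: rest).length : Int) - 1).toNat) = rest.length by simp, Int.toNat_zero,
      List.drop_zero, show rest.length + 1 - 0 = (a :: rest).length by simp, List.take_length]

-- B equals the spiral read: induction with the a :: m ++ [b] ends-decomposition
lemma alt_take (n : Nat) (seq : List Int) (h : seq.length ≤ n) :
    ((seq.zip seq.reverse).flatMap (fun p => [p.1, p.2])).take seq.length = spiralRef seq := by
  induction n generalizing seq with
  | zero =>
    have : seq = [] := by cases seq <;> simp_all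
    subst this; simp [spiralRef_nil]
  | succ n ih =>
    cases seq with
    | nil => simp [spiralRef_nil]
    | cons a rest =>
      by_cases hr : rest = []
      · subst hr; simp [spiralRef_single]
      · obtain ⟨m, b, hmb⟩ : ∃ m b, rest = m ++ [b] :=
          ⟨rest.dropLast, rest.getLast hr, (List.dropLast_append_getLast hr).symm⟩
        subst hmb
        have hrev : (a :: (m ++ [b])).reverse = b :: (m.reverse ++ [a]) := by simp
        rw [hrev, List.zip_cons_cons, List.zip_append (by simp), spiralRef_cons_concat]
        have hflat : ((m.zip m.reverse).flatMap (fun p => [p.1, p.2])).length = 2 * m.length := by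
          simp [List.length_flatMap]; omega
        rw [show (a :: (m ++ [b])).length = (m.length + 1) + 1 by simp]
        simp only [List.flatMap_cons, List.flatMap_append, List.zip_cons_cons,
          List.zip_nil_right, List.flatMap_nil, List.append_nil]
        rw [show ([a, b] : List Int) ++
            ((m.zip m.reverse).flatMap (fun p => [p.1, p.2]) ++ [b, a]) =
            a :: b :: ((m.zip m.reverse).flatMap (fun p => [p.1, p.2]) ++ [b, a]) by simp,
          List.take_succ_cons, List.take_succ_cons,
          List.take_append_of_le_length (by omega)]
        have hm : m.length ≤ n := by simp at h; omega
        rw [ih m hm]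

lemma alt_eq_spiralRef (seq : List Int) : t_spiral_alt seq = spiralRef seq := by
  unfold t_spiral_alt
  exact alt_take seq.length seq le_rfl

-- ===== VERDICT (by name: the statement is the Claim_ definition above) =====
theorem t_spiral_spec : Claim_equal_t_spiral := by
  intro seq _
  unfold Spec_t_spiral
  rw [t_spiral_eq_spiralRef, alt_eq_spiralRef]
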